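-- pv_equiv track=rewrite | github.com/mmatiny/school---editing-picture | functions.py | chek_reshte_khali_ya_na
-- ===== SOURCE A (Python) =====
-- def chek_reshte_khali_ya_na(vorody):
--            reshte_nadorost='no'
--            alphabet_ba_adad_ha=('1234567890qwertyuiopasdfghjklzxcvbnm')
--            for e in range (len(vorody)):
--                khane=vorody[e]
--                for i in range (len(alphabet_ba_adad_ha)):
--                    if khane!=alphabet_ba_adad_ha[i]:
--                       reshte_nadorost='yes'
--                       return 'no'
--            return 'yes'
-- ===== SOURCE B (Python) =====
-- def chek_reshte_khali_ya_na(vorody):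
--     return 'yes' if len(vorody) == 0 else 'no'
-- ===== Notes on version B (the rewrite author's own statement) =====
-- stated objective: simpler
-- what changed: B replaces A's nested character-vs-alphabet scan (which returns 'no' on the first character of any nonempty string, since no character equals every alphabet letter) by a closed-form emptiness test via len().
import Mathlib
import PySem

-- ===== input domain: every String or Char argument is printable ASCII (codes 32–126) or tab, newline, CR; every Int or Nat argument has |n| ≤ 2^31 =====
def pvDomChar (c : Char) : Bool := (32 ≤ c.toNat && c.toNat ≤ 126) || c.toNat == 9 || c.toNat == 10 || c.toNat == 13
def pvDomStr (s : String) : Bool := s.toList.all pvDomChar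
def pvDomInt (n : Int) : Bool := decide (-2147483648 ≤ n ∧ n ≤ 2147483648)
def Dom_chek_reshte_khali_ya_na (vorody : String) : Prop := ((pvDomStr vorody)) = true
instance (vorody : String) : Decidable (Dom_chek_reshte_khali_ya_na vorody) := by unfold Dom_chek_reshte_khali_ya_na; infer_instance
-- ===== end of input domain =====

-- B computes A's result in closed form: A's inner loop returns 'no' on the first
-- character of any nonempty input, so the answer is 'yes' iff the string is empty.
-- ===== PORT A =====
def pvAlpha : List Char := "1234567890qwertyuiopasdfghjklzxcvbnm".toList

def pvInnerA (khane : Char) : List Char → Option String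
  | [] => none
  | c :: rest => if khane ≠ c then some "no" else pvInnerA khane rest

def pvOuterA : List Char → String
  | [] => "yes"
  | khane :: rest =>
      match pvInnerA khane pvAlpha with
      | some r => r
      | none => pvOuterA rest

def chek_reshte_khali_ya_na (vorody : String) : String := pvOuterA vorody.toList

-- ===== PORT B =====
def chek_reshte_khali_ya_na_alt (vorody : String) : String :=
  if PySem.Str.len vorody == 0 then "yes" else "no"

-- ===== PRECONDITION & SPEC =====
def Spec_chek_reshte_khali_ya_na (vorody : String) (out : String) : Prop := out = chek_reshte_khali_ya_na_alt vorody
instance (vorody : String) (out : String) : Decidable (Spec_chek_reshte_khali_ya_na vorody out) := by unfold Spec_chek_reshte_khali_ya_na; infer_instance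

-- ===== CLAIM (what is proved, stated in full; the proofs are below) =====
def Claim_equal_chek_reshte_khali_ya_na : Prop := ∀ (vorody : String), Dom_chek_reshte_khali_ya_na vorody → Spec_chek_reshte_khali_ya_na vorody (chek_reshte_khali_ya_na vorody)

-- ===== LEMMAS AND PROOFS =====

-- ===== VERDICT (by name: the statement is the Claim_ definition above) =====
lemma pvInnerA_alpha (khane : Char) : pvInnerA khane pvAlpha = some "no" := by
  by_cases h : khane = '1'
  · subst h; decide
  · simp [pvAlpha, pvInnerA, h]

theorem chek_reshte_khali_ya_na_spec : Claim_equal_chek_reshte_khali_ya_na := by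
  intro vorody _
  unfold Spec_chek_reshte_khali_ya_na chek_reshte_khali_ya_na chek_reshte_khali_ya_na_alt
  cases h : vorody.toList with
  | nil => simp [pvOuterA, PySem.Str.len_eq, h]
  | cons c rest =>
      simp only [PySem.Str.len_eq, h, pvOuterA, pvInnerA_alpha]
      norm_num
      intro hc
      omega
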